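-- pv_equiv track=rewrite | github.com/sanskrit-lexicon/PWG | pwg_ls2/spruch/make_change_ls.py | change_ls_matching_given_2a
-- ===== SOURCE A (Python) =====
-- def change_ls_matching_given_2a(line):
--  replacements = [
--   ('</ls> <ls>v. l.',' v. l.'),
--   ('</ls> <ls>fgg.',' fgg.'),
--   ('</ls> <ls>fg.',' fg.'),
--   ]
--  newline = line
--  for old,new in replacements:
--   newline = newline.replace(old,new)
--  flag = not (newline == line)
--  return flag,newline
-- ===== SOURCE B (Python) =====
-- def change_ls_matching_given_2a(line):
--     # One left-to-right pass: at each position apply the first matching pattern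
--     # (longer 'fgg.' tried before 'fg.'), instead of three sequential global replaces.
--     out = []
--     i = 0
--     n = len(line)
--     while i < n:
--         if line.startswith('</ls> <ls>v. l.', i):
--             out.append(' v. l.')
--             i += 15
--         elif line.startswith('</ls> <ls>fgg.', i):
--             out.append(' fgg.')
--             i += 14
--         elif line.startswith('</ls> <ls>fg.', i):
--             out.append(' fg.')
--             i += 13
--         else:
--             out.append(line[i])
--             i += 1
--     newline = ''.join(out)
--     return newline != line, newline
-- ===== Notes on version B (the rewrite author's own statement) =====
-- stated objective: alternative
-- what changed: B replaces A's three sequential global str.replace passes by a single left-to-right scan that at each position applies the first matching of the three patterns (longer 'fgg.' before 'fg.') and copies a character otherwise.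
import Mathlib
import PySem

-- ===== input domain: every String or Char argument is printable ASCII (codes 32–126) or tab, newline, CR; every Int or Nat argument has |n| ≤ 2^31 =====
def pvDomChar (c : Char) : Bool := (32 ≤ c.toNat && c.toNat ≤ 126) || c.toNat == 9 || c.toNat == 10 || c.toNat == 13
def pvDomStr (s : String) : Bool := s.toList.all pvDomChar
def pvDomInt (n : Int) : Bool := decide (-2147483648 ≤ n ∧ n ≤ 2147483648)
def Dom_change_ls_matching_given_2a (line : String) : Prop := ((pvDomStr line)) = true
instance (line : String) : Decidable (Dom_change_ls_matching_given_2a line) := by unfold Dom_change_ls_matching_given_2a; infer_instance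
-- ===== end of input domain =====

-- B replaces A's three sequential global `str.replace` passes by ONE left-to-right scan
-- applying at each position the first matching pattern (objective: alternative, single pass).

-- ===== PORT A =====
def change_ls_matching_given_2a (line : String) : Bool × String :=
  -- newline = line; for old,new in replacements: newline = newline.replace(old,new)
  let newline := line
  let newline := PySem.Str.replace newline "</ls> <ls>v. l." " v. l."
  let newline := PySem.Str.replace newline "</ls> <ls>fgg." " fgg."
  let newline := PySem.Str.replace newline "</ls> <ls>fg." " fg."
  (!(newline == line), newline)

-- ===== PORT B =====
-- the three patterns and their replacements, as char lists
def pvP1 : List Char := "</ls> <ls>v. l.".toList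
def pvR1 : List Char := " v. l.".toList
def pvP2 : List Char := "</ls> <ls>fgg.".toList
def pvR2 : List Char := " fgg.".toList
def pvP3 : List Char := "</ls> <ls>fg.".toList
def pvR3 : List Char := " fg.".toList

-- Source B's while-loop: at each position try the three patterns in order, else copy one char
def pvScan (s : List Char) : List Char :=
  match s with
  | [] => []
  | c :: t =>
    if pvP1.isPrefixOf (c :: t) then pvR1 ++ pvScan (List.drop 15 (c :: t))
    else if pvP2.isPrefixOf (c :: t) then pvR2 ++ pvScan (List.drop 14 (c :: t))
    else if pvP3.isPrefixOf (c :: t) then pvR3 ++ pvScan (List.drop 13 (c :: t))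
    else c :: pvScan t
termination_by s.length
decreasing_by all_goals (simp [List.length_drop]; try omega)

def change_ls_matching_given_2a_alt (line : String) : Bool × String :=
  let newline := String.ofList (pvScan line.toList)
  (!(newline == line), newline)

-- ===== PRECONDITION & SPEC =====
def Spec_change_ls_matching_given_2a (line : String) (out : Bool × String) : Prop := out = change_ls_matching_given_2a_alt line
instance (line : String) (out : Bool × String) : Decidable (Spec_change_ls_matching_given_2a line out) := by unfold Spec_change_ls_matching_given_2a; infer_instance

-- ===== CLAIM (what is proved, stated in full; the proofs are below) =====
def Claim_equal_change_ls_matching_given_2a : Prop := ∀ (line : String), Dom_change_ls_matching_given_2a line → Spec_change_ls_matching_given_2a line (change_ls_matching_given_2a line)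

-- ===== LEMMAS AND PROOFS =====

-- structural characterization of Python's str.replace (for a nonempty pattern)
def pvRep (p r : List Char) (s : List Char) : List Char :=
  match s with
  | [] => []
  | c :: t =>
    if p.isPrefixOf (c :: t) then r ++ pvRep p r (t.drop (p.length - 1))
    else c :: pvRep p r t
termination_by s.length
decreasing_by all_goals (simp [List.length_drop]; try omega)

theorem pvRep_go (p r : List Char) (hp : p ≠ []) :
    ∀ (fuel : Nat) (l acc : List Char), l.length ≤ fuel →
      PySem.Chars.replace.go p r fuel l acc = acc.reverse ++ pvRep p r l := by
  intro fuel
  induction fuel with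
  | zero =>
    intro l acc hl
    have : l = [] := by cases l <;> simp_all
    subst this
    simp [PySem.Chars.replace.go, pvRep]
  | succ n ih =>
    intro l acc hl
    cases l with
    | nil => simp [PySem.Chars.replace.go, pvRep]
    | cons c t =>
      rw [PySem.Chars.replace.go]
      by_cases h : p.isPrefixOf (c :: t)
      · have hplen : 1 ≤ p.length := by cases p <;> simp_all
        rw [if_pos h]
        rw [ih _ _ (by simp [List.length_drop] at *; omega)]
        rw [pvRep, if_pos h]
        have : List.drop p.length (c :: t) = t.drop (p.length - 1) := by
          cases p with
          | nil => simp_all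
          | cons a q => simp
        rw [this, List.reverse_append]
        simp
      · rw [if_neg h, ih _ _ (by simp at hl ⊢; omega), pvRep, if_neg h]
        simp

theorem pvRep_replace (p r s : List Char) (hp : p ≠ []) :
    PySem.Chars.replace s p r = pvRep p r s := by
  rw [PySem.Chars.replace]
  rw [if_neg (by simp [List.isEmpty_iff, hp])]
  rw [pvRep_go p r hp s.length s [] le_rfl]
  simp

-- a mismatch inside the pattern's range refutes prefixhood
theorem pv_not_prefix_of_ne {p w : List Char} {k : Nat}
    (hk : k < p.length) (hne : p[k]? ≠ w[k]?) : ¬ p <+: w := by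
  rintro ⟨t, rfl⟩
  exact hne (List.getElem?_append_left hk).symm

-- every start position inside u has a mismatch against p, still inside u
def pvMiss (p u : List Char) : Prop :=
  ∀ i < u.length, ∃ k < p.length, i + k < u.length ∧ p[k]? ≠ u[i + k]?

theorem pvMiss_not_prefix {p u : List Char} (h : pvMiss p u) (v : List Char) :
    u ≠ [] → ¬ p <+: u ++ v := by
  intro hu
  obtain ⟨k, hk, hku, hne⟩ := h 0 (by cases u <;> simp_all)
  simp only [Nat.zero_add] at hku hne
  exact pv_not_prefix_of_ne hk (by rw [List.getElem?_append_left hku]; exact hne)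

theorem pvMiss_tail {p : List Char} {x : Char} {u : List Char}
    (h : pvMiss p (x :: u)) : pvMiss p u := by
  intro i hi
  obtain ⟨k, hk, hku, hne⟩ := h (i + 1) (by simp; omega)
  refine ⟨k, hk, by simp at hku; omega, ?_⟩
  have : (x :: u)[i + 1 + k]? = u[i + k]? := by
    rw [show i + 1 + k = (i + k) + 1 by omega]
    simp
  rwa [this] at hne

theorem pvRep_skip (p r : List Char) :
    ∀ (u v : List Char), pvMiss p u → pvRep p r (u ++ v) = u ++ pvRep p r v := by
  intro u
  induction u with
  | nil => intro v _; simp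
  | cons x u' ih =>
    intro v h
    have hnp : ¬ p.isPrefixOf (x :: (u' ++ v)) := by
      rw [List.isPrefixOf_iff_prefix]
      exact pvMiss_not_prefix h v (by simp)
    rw [List.cons_append, pvRep, if_neg hnp, ih v (pvMiss_tail h)]
    simp

theorem pvRep_match (p r v : List Char) (hp : p ≠ []) :
    pvRep p r (p ++ v) = r ++ pvRep p r v := by
  cases p with
  | nil => exact absurd rfl hp
  | cons a p' =>
    rw [List.cons_append, pvRep,
        if_pos (List.isPrefixOf_iff_prefix.mpr ⟨v, by simp⟩)]
    simp

-- the replacement text can never create or extend an occurrence of q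
def pvSafe (r q : List Char) : Prop :=
  ∀ j < q.length, ¬ r <+: q.drop j ∧ ¬ q.drop j <+: r

theorem pvRep_prefix_rev (p r : List Char) :
    ∀ (n : Nat) (q s : List Char), pvSafe r q → s.length ≤ n →
      q <+: pvRep p r s → q <+: s := by
  intro n
  induction n with
  | zero =>
    intro q s _ hl hq
    have : s = [] := by cases s <;> simp_all
    subst this
    simpa [pvRep] using hq
  | succ m ih =>
    intro q s hsafe hl hq
    cases s with
    | nil => simpa [pvRep] using hq
    | cons c t =>
      by_cases hpre : p.isPrefixOf (c :: t)
      · rw [pvRep, if_pos hpre] at hq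
        cases q with
        | nil => exact List.nil_prefix
        | cons c' q' =>
          exfalso
          rcases Nat.lt_or_ge r.length (c' :: q').length with hlt | hge
          · exact (hsafe 0 (by simp)).1
              (by simpa using List.prefix_of_prefix_length_le (List.prefix_append r _) hq (Nat.le_of_lt hlt))
          · exact (hsafe 0 (by simp)).2
              (by simpa using List.prefix_of_prefix_length_le hq (List.prefix_append r _) hge)
      · rw [pvRep, if_neg hpre] at hq
        cases q with
        | nil => exact List.nil_prefix
        | cons c' q' =>
          obtain ⟨rfl, hq'⟩ := List.cons_prefix_cons.mp hq
          have hsafe' : pvSafe r q' := by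
            intro j hj
            have := hsafe (j + 1) (by simp; omega)
            simpa using this
          exact List.cons_prefix_cons.mpr
            ⟨rfl, ih q' t hsafe' (by simp at hl; omega) hq'⟩

-- pvScan step equations for the three match cases (the earlier patterns can
-- never be prefixes at a later pattern's match site: mismatch inside the literal)
theorem pvScan_match1 (v : List Char) : pvScan (pvP1 ++ v) = pvR1 ++ pvScan v := by
  have hcons : pvP1 ++ v = '<' :: ("/ls> <ls>v. l.".toList ++ v) := rfl
  rw [hcons, pvScan, ← hcons, if_pos (List.isPrefixOf_iff_prefix.mpr ⟨v, rfl⟩)]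
  rw [show (15 : Nat) = pvP1.length from by decide, List.drop_left]

theorem pvScan_match2 (v : List Char) : pvScan (pvP2 ++ v) = pvR2 ++ pvScan v := by
  have h1 : ¬ pvP1.isPrefixOf (pvP2 ++ v) := by
    rw [List.isPrefixOf_iff_prefix]
    exact pv_not_prefix_of_ne (k := 10) (by decide)
      (by rw [List.getElem?_append_left (by decide)]; decide)
  have hcons : pvP2 ++ v = '<' :: ("/ls> <ls>fgg.".toList ++ v) := rfl
  rw [hcons, pvScan, ← hcons, if_neg h1,
      if_pos (List.isPrefixOf_iff_prefix.mpr ⟨v, rfl⟩)]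
  rw [show (14 : Nat) = pvP2.length from by decide, List.drop_left]

theorem pvScan_match3 (v : List Char) : pvScan (pvP3 ++ v) = pvR3 ++ pvScan v := by
  have h1 : ¬ pvP1.isPrefixOf (pvP3 ++ v) := by
    rw [List.isPrefixOf_iff_prefix]
    exact pv_not_prefix_of_ne (k := 10) (by decide)
      (by rw [List.getElem?_append_left (by decide)]; decide)
  have h2 : ¬ pvP2.isPrefixOf (pvP3 ++ v) := by
    rw [List.isPrefixOf_iff_prefix]
    exact pv_not_prefix_of_ne (k := 12) (by decide)
      (by rw [List.getElem?_append_left (by decide)]; decide)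
  have hcons : pvP3 ++ v = '<' :: ("/ls> <ls>fg.".toList ++ v) := rfl
  rw [hcons, pvScan, ← hcons, if_neg h1, if_neg h2,
      if_pos (List.isPrefixOf_iff_prefix.mpr ⟨v, rfl⟩)]
  rw [show (13 : Nat) = pvP3.length from by decide, List.drop_left]

-- the heart: three sequential single-pattern passes equal the one combined scan
theorem pv_main : ∀ (n : Nat) (s : List Char), s.length ≤ n →
    pvRep pvP3 pvR3 (pvRep pvP2 pvR2 (pvRep pvP1 pvR1 s)) = pvScan s := by
  intro n
  induction n with
  | zero =>
    intro s hl
    have : s = [] := by cases s <;> simp_all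
    subst this
    simp [pvRep, pvScan]
  | succ m ih =>
    intro s hl
    cases s with
    | nil => simp [pvRep, pvScan]
    | cons c t =>
      by_cases h1 : pvP1.isPrefixOf (c :: t)
      · obtain ⟨v, hv⟩ := List.isPrefixOf_iff_prefix.mp h1
        have hlv : v.length ≤ m := by
          have h := congrArg List.length hv
          have h15 : pvP1.length = 15 := by decide
          rw [List.length_append, h15] at h
          simp at h hl
          omega
        rw [← hv, pvRep_match pvP1 pvR1 v (by decide),
            pvRep_skip pvP2 pvR2 pvR1 _ (by unfold pvMiss; decide),
            pvRep_skip pvP3 pvR3 pvR1 _ (by unfold pvMiss; decide),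
            pvScan_match1, ih v hlv]
      · by_cases h2 : pvP2.isPrefixOf (c :: t)
        · obtain ⟨v, hv⟩ := List.isPrefixOf_iff_prefix.mp h2
          have hlv : v.length ≤ m := by
            have h := congrArg List.length hv
            have h14 : pvP2.length = 14 := by decide
            rw [List.length_append, h14] at h
            simp at h hl
            omega
          rw [← hv, pvRep_skip pvP1 pvR1 pvP2 _ (by unfold pvMiss; decide),
              pvRep_match pvP2 pvR2 _ (by decide),
              pvRep_skip pvP3 pvR3 pvR2 _ (by unfold pvMiss; decide),
              pvScan_match2, ih v hlv]
        · by_cases h3 : pvP3.isPrefixOf (c :: t)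
          · obtain ⟨v, hv⟩ := List.isPrefixOf_iff_prefix.mp h3
            have hlv : v.length ≤ m := by
              have h := congrArg List.length hv
              have h13 : pvP3.length = 13 := by decide
              rw [List.length_append, h13] at h
              simp at h hl
              omega
            rw [← hv, pvRep_skip pvP1 pvR1 pvP3 _ (by unfold pvMiss; decide),
                pvRep_skip pvP2 pvR2 pvP3 _ (by unfold pvMiss; decide),
                pvRep_match pvP3 pvR3 _ (by decide),
                pvScan_match3, ih v hlv]
          · -- no pattern matches at this position: all four functions copy c
            have hlen : t.length ≤ m := by simp at hl; omega
            have h2' : ¬ pvP2.isPrefixOf (pvRep pvP1 pvR1 (c :: t)) := by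
              rw [List.isPrefixOf_iff_prefix]
              intro hpre
              exact h2 (List.isPrefixOf_iff_prefix.mpr
                (pvRep_prefix_rev pvP1 pvR1 (c :: t).length pvP2 (c :: t) (by unfold pvSafe; decide) le_rfl hpre))
            have h3' : ¬ pvP3.isPrefixOf (pvRep pvP2 pvR2 (pvRep pvP1 pvR1 (c :: t))) := by
              rw [List.isPrefixOf_iff_prefix]
              intro hpre
              have step1 := pvRep_prefix_rev pvP2 pvR2 (pvRep pvP1 pvR1 (c :: t)).length pvP3
                (pvRep pvP1 pvR1 (c :: t)) (by unfold pvSafe; decide) le_rfl hpre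
              have step2 := pvRep_prefix_rev pvP1 pvR1 (c :: t).length pvP3
                (c :: t) (by unfold pvSafe; decide) le_rfl step1
              exact h3 (List.isPrefixOf_iff_prefix.mpr step2)
            have e1 : pvRep pvP1 pvR1 (c :: t) = c :: pvRep pvP1 pvR1 t := by
              rw [pvRep, if_neg h1]
            have e2 : pvRep pvP2 pvR2 (c :: pvRep pvP1 pvR1 t)
                = c :: pvRep pvP2 pvR2 (pvRep pvP1 pvR1 t) := by
              rw [pvRep, if_neg (e1 ▸ h2')]
            have e3 : pvRep pvP3 pvR3 (c :: pvRep pvP2 pvR2 (pvRep pvP1 pvR1 t))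
                = c :: pvRep pvP3 pvR3 (pvRep pvP2 pvR2 (pvRep pvP1 pvR1 t)) := by
              have := h3'
              rw [e1, e2] at this
              rw [pvRep, if_neg this]
            rw [pvScan, if_neg h1, if_neg h2, if_neg h3, e1, e2, e3, ih t hlen]

-- ===== VERDICT (by name: the statement is the Claim_ definition above) =====
theorem change_ls_matching_given_2a_spec : Claim_equal_change_ls_matching_given_2a := by
  intro line _
  unfold Spec_change_ls_matching_given_2a change_ls_matching_given_2a change_ls_matching_given_2a_alt
  have hstr : PySem.Str.replace (PySem.Str.replace (PySem.Str.replace line "</ls> <ls>v. l." " v. l.")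
      "</ls> <ls>fgg." " fgg.") "</ls> <ls>fg." " fg." = String.ofList (pvScan line.toList) := by
    rw [← String.toList_inj, String.toList_ofList, PySem.Str.toList_replace,
        PySem.Str.toList_replace, PySem.Str.toList_replace]
    rw [pvRep_replace _ _ _ (by decide), pvRep_replace _ _ _ (by decide),
        pvRep_replace _ _ _ (by decide)]
    exact pv_main line.toList.length line.toList le_rfl
  simp only [hstr]
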